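-- pv_equiv track=rewrite | github.com/GiulioRossetti/ASH | ash_model/classes/undirected.py | __presence_to_intervals
-- ===== SOURCE A (Python) =====
-- from typing import (
--     Any,
--     DefaultDict,
--     Dict,
--     Generator,
--     Iterable,
--     List,
--     Optional,
--     Set,
--     Tuple,
--     Union,
-- )
--
-- def __presence_to_intervals(presence: List[int]) -> List[Tuple[int, int]]:
--     """Convert a list of time instants into contiguous intervals."""
--     presence = sorted(presence)
--     intervals: List[Tuple[int, int]] = []
--     start = presence[0]
--     end = presence[0]
--
--     for i in range(1, len(presence)):
--         if presence[i] == end + 1: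
--             end = presence[i]
--         else:
--             intervals.append((start, end))
--             start = presence[i]
--             end = presence[i]
--
--     intervals.append((start, end))
--     return intervals
-- ===== SOURCE B (Python) =====
-- def __presence_to_intervals(presence):
--     """Convert a list of time instants into contiguous intervals."""
--     sp = sorted(presence)
--     n = len(sp)
--     breaks = [i for i in range(1, n) if sp[i] != sp[i - 1] + 1]
--     bounds = [0] + breaks + [n]
--     return [(sp[a], sp[b - 1]) for a, b in zip(bounds, bounds[1:])]
-- ===== Notes on version B (the rewrite author's own statement) =====
-- stated objective: simpler
-- what changed: Replaces A's online accumulator loop (carrying start/end state and conditionally flushing intervals) with a staged, loop-free decomposition: first a comprehension computing the list of break indices, then a zip of consecutive boundaries mapped to (first, last) pairs.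
import Mathlib
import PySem

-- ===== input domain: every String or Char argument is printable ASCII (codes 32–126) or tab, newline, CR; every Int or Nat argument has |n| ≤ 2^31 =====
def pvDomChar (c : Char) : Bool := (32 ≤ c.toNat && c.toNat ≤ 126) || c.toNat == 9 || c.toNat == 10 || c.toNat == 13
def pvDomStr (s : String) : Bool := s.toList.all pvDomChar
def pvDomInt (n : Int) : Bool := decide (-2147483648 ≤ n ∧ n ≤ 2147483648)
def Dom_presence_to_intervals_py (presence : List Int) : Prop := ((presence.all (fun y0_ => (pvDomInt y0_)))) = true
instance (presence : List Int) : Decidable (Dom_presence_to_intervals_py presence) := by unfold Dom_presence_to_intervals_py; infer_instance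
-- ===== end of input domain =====

-- B replaces A's start/end accumulator loop by a staged, loop-free decomposition (break indices, then zipped boundary pairs); A raises IndexError on the empty list (excluded by Pre_).


-- ===== PORT A =====
-- the for-loop over range(1, len(presence)): state (start, end, intervals)
def pvLoopA : List Int → Int → Int → List (Int × Int) → List (Int × Int)
  | [], start, e, acc => acc ++ [(start, e)]
  | x :: xs, start, e, acc =>
    if x = e + 1 then pvLoopA xs start x acc
    else pvLoopA xs x x (acc ++ [(start, e)])

def presence_to_intervals_py (presence : List Int) : List (Int × Int) :=
  match PySem.List.sorted presence (fun x => x) false with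
  | [] => []                       -- reading the first element raises IndexError here; excluded by Pre_
  | x :: xs => pvLoopA xs x x []   -- start = end = first element, then the loop

-- ===== PORT B =====
-- list reads via getD: every index read is in range whenever the list is nonempty (Pre_);
-- on [] Python raises IndexError (excluded by Pre_).
def presence_to_intervals_py_alt (presence : List Int) : List (Int × Int) :=
  let sp := PySem.List.sorted presence (fun x => x) false
  let n := sp.length
  let breaks := (List.range' 1 (n - 1)).filter (fun i => decide (sp.getD i 0 ≠ sp.getD (i - 1) 0 + 1))
  let bounds := 0 :: breaks ++ [n]
  (bounds.zip bounds.tail).map (fun ab => (sp.getD ab.1 0, sp.getD (ab.2 - 1) 0))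

-- ===== PRECONDITION & SPEC =====
-- A reads the first element of the sorted list: on the empty list it raises IndexError (so does B), so Pre_ excludes it.
def Pre_presence_to_intervals_py (presence : List Int) : Prop := presence ≠ []
instance (presence : List Int) : Decidable (Pre_presence_to_intervals_py presence) := by unfold Pre_presence_to_intervals_py; infer_instance
def pvWitness_presence_to_intervals_py : List Int := [3, 1, 2, 5, 5]

def Spec_presence_to_intervals_py (presence : List Int) (out : List (Int × Int)) : Prop := out = presence_to_intervals_py_alt presence
instance (presence : List Int) (out : List (Int × Int)) : Decidable (Spec_presence_to_intervals_py presence out) := by unfold Spec_presence_to_intervals_py; infer_instance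

-- ===== CLAIM (what is proved, stated in full; the proofs are below) =====
def Claim_equal_presence_to_intervals_py : Prop := ∀ (presence : List Int), Dom_presence_to_intervals_py presence → Pre_presence_to_intervals_py presence → Spec_presence_to_intervals_py presence (presence_to_intervals_py presence)

-- ===== LEMMAS AND PROOFS =====

-- bridge: "chop one maximal run off the front", the common shape of both programs.
def pvRun : Int → List Int → Int × List Int
  | e, [] => (e, [])
  | e, x :: xs => if x = e + 1 then pvRun x xs else (e, x :: xs)

theorem pvRun_snd_le (e : Int) (rest : List Int) : (pvRun e rest).2.length ≤ rest.length := by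
  induction rest generalizing e with
  | nil => simp [pvRun]
  | cons x xs ih =>
    simp only [pvRun]
    split
    · exact le_trans (ih x) (Nat.le_succ _)
    · simp

def pvChop : List Int → List (Int × Int)
  | [] => []
  | s :: rest =>
    [(s, (pvRun s rest).1)] ++ pvChop (pvRun s rest).2
termination_by sp => sp.length
decreasing_by exact Nat.lt_succ_of_le (pvRun_snd_le s rest)

-- A's loop, started on the tail xs with run state e, is acc ++ chop.
theorem pvLoopA_eq_chop (xs : List Int) (start e : Int) (acc : List (Int × Int)) :
    pvLoopA xs start e acc = acc ++ [(start, (pvRun e xs).1)] ++ pvChop (pvRun e xs).2 := by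
  induction xs generalizing start e acc with
  | nil => simp [pvLoopA, pvRun, pvChop]
  | cons x t ih =>
    simp only [pvLoopA, pvRun]
    split
    · exact ih start x acc
    · rw [ih x x (acc ++ [(start, e)])]
      simp [pvChop]

-- proof-side device: the first break index ≥ j (or n), matching pvRun's stopping point
def pvNextBrk (sp : List Int) (n : Nat) (j : Nat) : Nat :=
  if _h : j < n ∧ sp.getD j 0 = sp.getD (j - 1) 0 + 1 then pvNextBrk sp n (j + 1)
  else j
termination_by n - j

theorem pvNextBrk_ge (sp : List Int) (n j : Nat) : j ≤ pvNextBrk sp n j := by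
  unfold pvNextBrk
  split
  · exact le_trans (Nat.le_succ j) (pvNextBrk_ge sp n (j + 1))
  · exact le_refl j
termination_by n - j

-- pvRun on the suffix from j: end value sp[k-1], rest = drop k, where k = pvNextBrk
theorem pvNextBrk_eq_run (sp : List Int) (j : Nat) (h1 : 1 ≤ j) (h2 : j ≤ sp.length) :
    pvNextBrk sp sp.length j ≤ sp.length ∧
      pvRun (sp.getD (j - 1) 0) (sp.drop j) =
        (sp.getD (pvNextBrk sp sp.length j - 1) 0, sp.drop (pvNextBrk sp sp.length j)) := by
  unfold pvNextBrk
  split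
  · rename_i hc
    obtain ⟨hjn, heq⟩ := hc
    have hgj : sp.getD j 0 = sp[j] := List.getD_eq_getElem sp 0 hjn
    have ih := pvNextBrk_eq_run sp (j + 1) (by omega) (by omega)
    refine ⟨ih.1, ?_⟩
    have hdrop : sp.drop j = sp[j] :: sp.drop (j + 1) := (List.getElem_cons_drop (by omega)).symm
    rw [hdrop]
    simp only [pvRun, ← hgj]
    rw [if_pos heq]
    simpa using ih.2
  · rename_i hc
    refine ⟨h2, ?_⟩
    by_cases hjn : j < sp.length
    · have hgj : sp.getD j 0 = sp[j] := List.getD_eq_getElem sp 0 hjn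
      have heq : ¬ sp.getD j 0 = sp.getD (j - 1) 0 + 1 := fun he => hc ⟨hjn, he⟩
      have hdrop : sp.drop j = sp[j] :: sp.drop (j + 1) := (List.getElem_cons_drop (by omega)).symm
      rw [hdrop]
      simp only [pvRun, ← hgj]
      rw [if_neg heq, hgj, ← hdrop]
    · have hnil : sp.drop j = [] := List.drop_eq_nil_of_le (by omega)
      rw [hnil]
      simp [pvRun]
termination_by sp.length - j

-- the break-index comprehension on the suffix from j, peeled at pvNextBrk
theorem filter_breaks (sp : List Int) (j : Nat) :
    (List.range' j (sp.length - j)).filter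
        (fun i => decide (sp.getD i 0 ≠ sp.getD (i - 1) 0 + 1)) =
      (if pvNextBrk sp sp.length j < sp.length
       then pvNextBrk sp sp.length j ::
         (List.range' (pvNextBrk sp sp.length j + 1)
             (sp.length - (pvNextBrk sp sp.length j + 1))).filter
           (fun i => decide (sp.getD i 0 ≠ sp.getD (i - 1) 0 + 1))
       else []) := by
  unfold pvNextBrk
  split
  · rename_i hc
    obtain ⟨hjn, heq⟩ := hc
    have hr : List.range' j (sp.length - j) = j :: List.range' (j + 1) (sp.length - (j + 1)) := by
      have : sp.length - j = (sp.length - (j + 1)) + 1 := by omega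
      rw [this, List.range'_succ]
    rw [hr]
    simp only [List.filter_cons]
    rw [if_neg (by simp only [decide_eq_true_eq]; exact not_not_intro heq)]
    exact filter_breaks sp (j + 1)
  · rename_i hc
    by_cases hjn : j < sp.length
    · have hbrk : sp.getD j 0 ≠ sp.getD (j - 1) 0 + 1 := fun he => hc ⟨hjn, he⟩
      have hr : List.range' j (sp.length - j) = j :: List.range' (j + 1) (sp.length - (j + 1)) := by
        have : sp.length - j = (sp.length - (j + 1)) + 1 := by omega
        rw [this, List.range'_succ]
      rw [hr, if_pos hjn]
      simp only [List.filter_cons]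
      rw [if_pos (by simp only [decide_eq_true_eq]; exact hbrk)]
    · rw [if_neg hjn]
      have : sp.length - j = 0 := by omega
      simp [this]
termination_by sp.length - j

-- pairs of consecutive boundaries, as the port builds them
def pvPairs (sp : List Int) (l : List Nat) : List (Int × Int) :=
  (l.zip l.tail).map (fun ab => (sp.getD ab.1 0, sp.getD (ab.2 - 1) 0))

theorem pvPairs_cons (sp : List Int) (a b : Nat) (t : List Nat) :
    pvPairs sp (a :: b :: t) = (sp.getD a 0, sp.getD (b - 1) 0) :: pvPairs sp (b :: t) := rfl

-- the chop of the suffix from a equals the pairs of its boundary list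
theorem chop_eq_pairs (sp : List Int) (a : Nat) (ha : a < sp.length) :
    pvChop (sp.drop a) =
      pvPairs sp (a :: ((List.range' (a + 1) (sp.length - (a + 1))).filter
          (fun i => decide (sp.getD i 0 ≠ sp.getD (i - 1) 0 + 1)) ++ [sp.length])) := by
  have hga : sp.getD a 0 = sp[a] := List.getD_eq_getElem sp 0 ha
  have hdrop : sp.drop a = sp[a] :: sp.drop (a + 1) := (List.getElem_cons_drop (by omega)).symm
  have hrun := pvNextBrk_eq_run sp (a + 1) (by omega) (by omega)
  have hkey := hrun.2
  rw [Nat.add_sub_cancel] at hkey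
  set k := pvNextBrk sp sp.length (a + 1) with hk
  have hkge : a + 1 ≤ k := pvNextBrk_ge sp sp.length (a + 1)
  rw [hdrop]
  simp only [pvChop]
  rw [← hga, hkey]
  rw [filter_breaks sp (a + 1), ← hk]
  by_cases hkn : k < sp.length
  · rw [if_pos hkn]
    have hrec := chop_eq_pairs sp k hkn
    simp only [List.cons_append, pvPairs_cons]
    rw [hrec]
    simp [pvPairs]
  · rw [if_neg hkn]
    have hkeq : k = sp.length := by omega
    rw [hkeq, List.drop_length]
    simp [pvChop, pvPairs]
termination_by sp.length - a
decreasing_by omega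

-- ===== VERDICT (by name: the statement is the Claim_ definition above) =====
theorem presence_to_intervals_py_spec : Claim_equal_presence_to_intervals_py := by
  intro presence _ hpre
  unfold Spec_presence_to_intervals_py presence_to_intervals_py presence_to_intervals_py_alt
  cases hs : PySem.List.sorted presence (fun x => x) false with
  | nil =>
    have hperm := PySem.List.sorted_perm presence (fun x => x) false
    rw [hs] at hperm
    exact absurd (List.nil_perm.mp hperm) hpre
  | cons x t =>
    show pvLoopA t x x [] =
      pvPairs (x :: t) (0 :: ((List.range' 1 ((x :: t).length - 1)).filter
        (fun i => decide ((x :: t).getD i 0 ≠ (x :: t).getD (i - 1) 0 + 1)) ++ [(x :: t).length]))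
    have h0 := chop_eq_pairs (x :: t) 0 (by simp)
    rw [List.drop_zero] at h0
    rw [← h0]
    have := pvLoopA_eq_chop t x x []
    rw [this]
    show _ = pvChop (x :: t)
    simp [pvChop]
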